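-- pv_equiv track=rewrite | github.com/dwilliams27/psp-autodecomp | tools/orchestrator.py | _choose_dirty_snapshot_source
-- ===== SOURCE A (Python) =====
-- def _choose_dirty_snapshot_source(func, dirty_paths):
--     """Pick the most relevant dirty source file for an unparsed failure."""
--     paths = sorted(p.lstrip("./") for p in dirty_paths
--                    if p.startswith(("src/", "include/")))
--     if not paths:
--         return None
--     existing = func.get("src_file")
--     if existing and existing.lstrip("./") in paths:
--         return existing.lstrip("./")
--     cls = func.get("class_name") or ""
--     if cls:
--         safe = _safe_class_filename(cls)
--         preferred = [f"src/{safe}.cpp", f"include/{safe}.h"]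
--         for p in preferred:
--             if p in paths:
--                 return p
--         for p in paths:
--             if p.startswith(f"src/{safe}_") and p.endswith(".cpp"):
--                 return p
--     for p in paths:
--         if p.startswith("src/") and p.endswith((".cpp", ".c")):
--             return p
--     return paths[0]
--
-- def _safe_class_filename(class_name):
--     """Convert a C++ class name to its src/include base filename."""
--     cs = class_name.replace("::", "_")
--     return "".join(c for c in cs if c.isalnum() or c in "_-")
-- ===== SOURCE B (Python) =====
-- def _safe_class_filename(class_name):
--     """Convert a C++ class name to its src/include base filename."""
--     cs = class_name.replace("::", "_")
--     return "".join(c for c in cs if c.isalnum() or c in "_-")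
--
--
-- def _choose_dirty_snapshot_source(func, dirty_paths):
--     """Pick the most relevant dirty source file for an unparsed failure.
--
--     Instead of five separate scans with early returns, assign every candidate
--     path an integer priority rank and take a single keyed min over the sorted
--     list (Python's min keeps the first element on ties).
--     """
--     paths = sorted(p.lstrip("./") for p in dirty_paths
--                    if p.startswith(("src/", "include/")))
--     if not paths:
--         return None
--     existing = func.get("src_file")
--     target = existing.lstrip("./") if existing else None
--     cls = func.get("class_name") or ""
--     safe = _safe_class_filename(cls) if cls else None
--
--     def rank(p):
--         if target is not None and p == target:
--             return 0
--         if safe is not None: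
--             if p == f"src/{safe}.cpp":
--                 return 1
--             if p == f"include/{safe}.h":
--                 return 2
--             if p.startswith(f"src/{safe}_") and p.endswith(".cpp"):
--                 return 3
--         if p.startswith("src/") and p.endswith((".cpp", ".c")):
--             return 4
--         return 5
--
--     return min(paths, key=rank)
-- ===== Notes on version B (the rewrite author's own statement) =====
-- stated objective: simpler
-- what changed: A's five separate early-return scans over the sorted path list (existing hit, two preferred names, src/<safe>_*.cpp scan, src/*.cpp|.c scan, fallback) are replaced by one integer priority rank per path and a single keyed min(paths, key=rank), relying on Python's min keeping the first element on ties.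
import Mathlib
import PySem

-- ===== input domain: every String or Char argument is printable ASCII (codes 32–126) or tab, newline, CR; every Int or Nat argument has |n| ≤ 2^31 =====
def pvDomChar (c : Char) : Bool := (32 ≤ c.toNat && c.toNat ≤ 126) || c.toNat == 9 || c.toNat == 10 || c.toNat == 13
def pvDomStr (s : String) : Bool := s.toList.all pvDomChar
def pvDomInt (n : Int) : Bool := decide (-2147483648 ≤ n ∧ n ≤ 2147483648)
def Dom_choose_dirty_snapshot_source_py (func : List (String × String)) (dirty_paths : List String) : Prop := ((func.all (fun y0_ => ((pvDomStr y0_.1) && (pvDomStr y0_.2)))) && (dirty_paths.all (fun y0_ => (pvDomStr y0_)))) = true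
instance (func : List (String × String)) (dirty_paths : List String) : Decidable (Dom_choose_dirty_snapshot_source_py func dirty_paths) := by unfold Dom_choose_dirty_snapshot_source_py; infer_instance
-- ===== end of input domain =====

-- B replaces A's five early-return scans over `paths` by one integer priority
-- rank per path and a single keyed min (first minimum on ties); objective: simpler.

-- ===== shared helpers (these lines of Python are identical in Source A and Source B) =====
-- Hand port of Python's s.lstrip("./"): drop leading '.' and '/' characters (exact).
def pvLstripDS (s : List Char) : List Char := s.dropWhile (fun c => c == '.' || c == '/')

-- _safe_class_filename: replace "::" by "_", keep alnum and '_' '-' characters.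
def pvSafeCF (cls : List Char) : List Char :=
  (PySem.Chars.replace cls [':', ':'] ['_']).filter
    (fun c => PySem.Chars.isalnum c || c == '_' || c == '-')

-- sorted(p.lstrip("./") for p in dirty_paths if p.startswith(("src/", "include/")))
def pvPaths (dirty_paths : List String) : List (List Char) :=
  PySem.List.sorted
    (((dirty_paths.map String.toList).filter (fun p =>
        PySem.Chars.startswith p "src/".toList || PySem.Chars.startswith p "include/".toList)).map
      pvLstripDS)
    (fun x => x) false

-- existing = func.get("src_file")
def pvExisting (func : List (String × String)) : Option String :=
  PySem.Dict.get? ⟨func⟩ "src_file"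

-- cls = func.get("class_name") or ""
def pvCls (func : List (String × String)) : List Char :=
  match PySem.Dict.get? ⟨func⟩ "class_name" with
  | none => "".toList
  | some c => if c = "" then "".toList else c.toList

-- the strings f"src/{safe}.cpp" and f"include/{safe}.h"
def pvSc (safe : List Char) : List Char := "src/".toList ++ safe ++ ".cpp".toList
def pvIh (safe : List Char) : List Char := "include/".toList ++ safe ++ ".h".toList

-- p.startswith(f"src/{safe}_") and p.endswith(".cpp")
def pvPat3 (safe p : List Char) : Bool :=
  PySem.Chars.startswith p ("src/".toList ++ safe ++ "_".toList) &&
    PySem.Chars.endswith p ".cpp".toList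

-- p.startswith("src/") and p.endswith((".cpp", ".c"))
def pvPat4 (p : List Char) : Bool :=
  PySem.Chars.startswith p "src/".toList &&
    (PySem.Chars.endswith p ".cpp".toList || PySem.Chars.endswith p ".c".toList)

-- ===== PORT A =====
-- A's tail after the `existing` check: the preferred pair, the src/<safe>_*.cpp scan,
-- the src/*.cpp|.c scan, and the paths[0] fallback.
def pvARest (paths : List (List Char)) (cls : List Char) : Option (List Char) :=
  let safePart : Option (List Char) :=
    if cls ≠ [] then
      let safe := pvSafeCF cls
      match [pvSc safe, pvIh safe].find? (fun p => decide (p ∈ paths)) with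
      | some p => some p
      | none => paths.find? (fun p => pvPat3 safe p)
    else none
  match safePart with
  | some p => some p
  | none =>
      match paths.find? (fun p => pvPat4 p) with
      | some p => some p
      | none => paths.head?     -- paths[0]; only reached with paths ≠ []

def choose_dirty_snapshot_source_py (func : List (String × String)) (dirty_paths : List String) : Option String :=
  let paths := pvPaths dirty_paths
  if paths = [] then none
  else
    match pvExisting func with
    | some e =>
        if e ≠ "" ∧ pvLstripDS e.toList ∈ paths then some (String.ofList (pvLstripDS e.toList))
        else (pvARest paths (pvCls func)).map String.ofList
    | none => (pvARest paths (pvCls func)).map String.ofList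

-- ===== PORT B =====
-- rank(p) of Source B, with target/safe as Options (None ↔ none)
def pvRankTail (p : List Char) : Nat := if pvPat4 p then 4 else 5

def pvRank (target? : Option (List Char)) (safe? : Option (List Char)) (p : List Char) : Nat :=
  if target? = some p then 0
  else
    match safe? with
    | some safe =>
        if p = pvSc safe then 1
        else if p = pvIh safe then 2
        else if pvPat3 safe p then 3
        else pvRankTail p
    | none => pvRankTail p

def choose_dirty_snapshot_source_py_alt (func : List (String × String)) (dirty_paths : List String) : Option String :=
  let paths := pvPaths dirty_paths
  if paths = [] then none
  else
    let target? : Option (List Char) :=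
      match pvExisting func with
      | some e => if e ≠ "" then some (pvLstripDS e.toList) else none
      | none => none
    let cls := pvCls func
    let safe? : Option (List Char) := if cls ≠ [] then some (pvSafeCF cls) else none
    (PySem.List.min? paths (pvRank target? safe?)).map String.ofList

-- ===== PRECONDITION & SPEC =====
def Spec_choose_dirty_snapshot_source_py (func : List (String × String)) (dirty_paths : List String) (out : Option String) : Prop := out = choose_dirty_snapshot_source_py_alt func dirty_paths
instance (func : List (String × String)) (dirty_paths : List String) (out : Option String) : Decidable (Spec_choose_dirty_snapshot_source_py func dirty_paths out) := by unfold Spec_choose_dirty_snapshot_source_py; infer_instance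

-- ===== CLAIM (what is proved, stated in full; the proofs are below) =====
def Claim_equal_choose_dirty_snapshot_source_py : Prop := ∀ (func : List (String × String)) (dirty_paths : List String), Dom_choose_dirty_snapshot_source_py func dirty_paths → Spec_choose_dirty_snapshot_source_py func dirty_paths (choose_dirty_snapshot_source_py func dirty_paths)

-- ===== LEMMAS AND PROOFS =====

-- min?'s fold keeps the accumulator when nothing beats it
lemma pvFoldlKeep {α : Type} (key : α → Nat) (l : List α) (m : α)
    (h : ∀ y ∈ l, ¬ key y < key m) :
    l.foldl (fun acc x =>
      match acc with
      | none => some x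
      | some m => if key x < key m then some x else some m) (some m) = some m := by
  induction l with
  | nil => rfl
  | cons y t ih =>
      simp only [List.foldl_cons]
      rw [if_neg (h y (by simp))]
      exact ih (fun z hz => h z (by simp [hz]))

-- min? of l1 ++ c :: l2 is c when c strictly beats everything before it and weakly everything after
lemma pvMinAppend {α : Type} (key : α → Nat) (l1 l2 : List α) (c : α)
    (h1 : ∀ y ∈ l1, key c < key y) (h2 : ∀ y ∈ l2, key c ≤ key y) :
    PySem.List.min? (l1 ++ c :: l2) key = some c := by
  unfold PySem.List.min?
  rw [List.foldl_append]
  cases hm : PySem.List.min? l1 key with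
  | none =>
      have : l1 = [] := (PySem.List.min?_eq_none_iff _ _).mp hm
      unfold PySem.List.min? at hm
      rw [hm]
      simp only [List.foldl_cons]
      exact pvFoldlKeep key l2 c (fun y hy => Nat.not_lt.mpr (h2 y hy))
  | some m1 =>
      have hm1 := PySem.List.min?_mem hm
      unfold PySem.List.min? at hm
      rw [hm]
      simp only [List.foldl_cons]
      rw [if_pos (h1 m1 hm1)]
      exact pvFoldlKeep key l2 c (fun y hy => Nat.not_lt.mpr (h2 y hy))

-- min? when the minimal value is attained by a unique element
lemma pvMinUnique {α : Type} (key : α → Nat) (xs : List α) (c : α)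
    (hc : c ∈ xs) (hmin : ∀ y ∈ xs, key c ≤ key y)
    (huniq : ∀ y ∈ xs, key y = key c → y = c) :
    PySem.List.min? xs key = some c := by
  cases hm : PySem.List.min? xs key with
  | none =>
      rw [(PySem.List.min?_eq_none_iff _ _).mp hm] at hc
      exact absurd hc (by simp)
  | some m =>
      have hmem := PySem.List.min?_mem hm
      have h1 := PySem.List.min?_isMin hm c hc
      have h2 := hmin m hmem
      exact congrArg some (huniq m hmem (Nat.le_antisymm h1 h2))

-- ranks of particular elements
lemma pvRank_some (t? : Option (List Char)) (safe p : List Char) :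
    pvRank t? (some safe) p =
      if t? = some p then 0
      else if p = pvSc safe then 1
      else if p = pvIh safe then 2
      else if pvPat3 safe p then 3
      else pvRankTail p := rfl

lemma pvRank_none' (t? : Option (List Char)) (p : List Char) :
    pvRank t? none p = if t? = some p then 0 else pvRankTail p := rfl

lemma pvRankTail_ge (p : List Char) : 4 ≤ pvRankTail p := by
  unfold pvRankTail; split_ifs <;> omega

lemma pvRankTail_of_not4 (p : List Char) (h : ¬ pvPat4 p = true) : pvRankTail p = 5 := by
  unfold pvRankTail; rw [if_neg h]

lemma pvRankTail_four (p : List Char) (h : pvPat4 p = true) : pvRankTail p = 4 := by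
  unfold pvRankTail; rw [if_pos h]

lemma pvRank_target (t? s? : Option (List Char)) (p : List Char) (h : t? = some p) :
    pvRank t? s? p = 0 := by unfold pvRank; rw [if_pos h]

lemma pvRank_ne_zero (t? s? : Option (List Char)) (p : List Char) (h : t? ≠ some p) :
    pvRank t? s? p ≠ 0 := by
  cases s? with
  | none => rw [pvRank_none', if_neg h]; have := pvRankTail_ge p; omega
  | some safe =>
      rw [pvRank_some, if_neg h]
      split_ifs <;> first | omega | (have := pvRankTail_ge p; omega)

lemma pvRank_eq_zero_imp (t? s? : Option (List Char)) (p : List Char)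
    (h : pvRank t? s? p = 0) : t? = some p := by
  by_contra hne; exact pvRank_ne_zero t? s? p hne h

lemma pvSrcNeInc (safe : List Char) : pvSc safe ≠ pvIh safe := by
  intro h
  have := congrArg List.head? h
  simp [pvSc, pvIh] at this

lemma pvRank_sc (t? : Option (List Char)) (safe : List Char) (h : t? ≠ some (pvSc safe)) :
    pvRank t? (some safe) (pvSc safe) = 1 := by
  rw [pvRank_some, if_neg h, if_pos rfl]

lemma pvRank_ih (t? : Option (List Char)) (safe : List Char) (h : t? ≠ some (pvIh safe)) :
    pvRank t? (some safe) (pvIh safe) = 2 := by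
  rw [pvRank_some, if_neg h, if_neg (fun hh => pvSrcNeInc safe hh.symm), if_pos rfl]

lemma pvRank_pat3 (t? : Option (List Char)) (safe p : List Char)
    (h0 : t? ≠ some p) (h1 : p ≠ pvSc safe) (h2 : p ≠ pvIh safe) (h3 : pvPat3 safe p = true) :
    pvRank t? (some safe) p = 3 := by
  rw [pvRank_some, if_neg h0, if_neg h1, if_neg h2, if_pos h3]

lemma pvRank_tail_some (t? : Option (List Char)) (safe p : List Char)
    (h0 : t? ≠ some p) (h1 : p ≠ pvSc safe) (h2 : p ≠ pvIh safe) (h3 : ¬ pvPat3 safe p = true) :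
    pvRank t? (some safe) p = pvRankTail p := by
  rw [pvRank_some, if_neg h0, if_neg h1, if_neg h2, if_neg h3]

lemma pvRank_tail_none (t? : Option (List Char)) (p : List Char) (h0 : t? ≠ some p) :
    pvRank t? none p = pvRankTail p := by
  rw [pvRank_none', if_neg h0]

lemma pvRank_eq_one_imp (t? : Option (List Char)) (safe p : List Char)
    (h : pvRank t? (some safe) p = 1) : p = pvSc safe := by
  rw [pvRank_some] at h
  unfold pvRankTail at h
  split_ifs at h <;> first | assumption | omega

lemma pvRank_eq_two_imp (t? : Option (List Char)) (safe p : List Char)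
    (h : pvRank t? (some safe) p = 2) : p = pvIh safe := by
  rw [pvRank_some] at h
  unfold pvRankTail at h
  split_ifs at h <;> first | assumption | omega

lemma pvRank_eq_three_imp (t? : Option (List Char)) (safe p : List Char)
    (h : pvRank t? (some safe) p = 3) : pvPat3 safe p = true := by
  rw [pvRank_some] at h
  unfold pvRankTail at h
  split_ifs at h <;> first | assumption | omega

-- the final rank-4/5 scan: first pvPat4 match, else the head
lemma pvTailCore (paths : List (List Char)) (hne : paths ≠ []) (key : List Char → Nat)
    (hkey : ∀ p ∈ paths, key p = pvRankTail p) :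
    (match paths.find? (fun p => pvPat4 p) with
     | some p => some p
     | none => paths.head?)
    = PySem.List.min? paths key := by
  cases hf : paths.find? (fun p => pvPat4 p) with
  | some p4 =>
      obtain ⟨hp4, l1, l2, hsplit, hl1⟩ := List.find?_eq_some_iff_append.mp hf
      subst hsplit
      rw [pvMinAppend key l1 l2 p4 ?_ ?_]
      · intro y hy
        rw [hkey y (by simp [hy]), hkey p4 (by simp), pvRankTail_four _ hp4,
            pvRankTail_of_not4 y (by simpa using hl1 y hy)]
        omega
      · intro y hy
        rw [hkey y (by simp [hy]), hkey p4 (by simp), pvRankTail_four _ hp4]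
        exact pvRankTail_ge y
  | none =>
      have hall := List.find?_eq_none.mp hf
      cases paths with
      | nil => exact absurd rfl hne
      | cons h t =>
          rw [show (h :: t) = [] ++ h :: t from rfl, pvMinAppend key [] t h (by simp) ?_]
          · rfl
          · intro y hy
            rw [hkey y (by simp [hy]), hkey h (by simp),
                pvRankTail_of_not4 y (by simpa using hall y (by simp [hy])),
                pvRankTail_of_not4 h (by simpa using hall h (by simp))]

-- A's tail equals the keyed min when no path is the target
lemma pvCoreRest (paths : List (List Char)) (hne : paths ≠ []) (t? : Option (List Char))
    (cls : List Char) (hT : ∀ p ∈ paths, t? ≠ some p) :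
    pvARest paths cls
      = PySem.List.min? paths (pvRank t? (if cls ≠ [] then some (pvSafeCF cls) else none)) := by
  unfold pvARest
  by_cases hcls : cls = []
  · simp only [hcls, ne_eq, not_true_eq_false, if_false]
    rw [← pvTailCore paths hne _ (fun p hp => pvRank_tail_none t? p (hT p hp))]
  · simp only [ne_eq, hcls, not_false_eq_true, if_true]
    set safe := pvSafeCF cls with hsdef
    by_cases hsc : pvSc safe ∈ paths
    · have hfind : [pvSc safe, pvIh safe].find? (fun p => decide (p ∈ paths)) = some (pvSc safe) := by
        simp [List.find?, hsc]
      rw [hfind]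
      refine (pvMinUnique _ paths (pvSc safe) hsc ?_ ?_).symm
      · intro y hy
        rw [pvRank_sc t? safe (hT _ hsc)]
        have : pvRank t? (some safe) y ≠ 0 := pvRank_ne_zero _ _ _ (hT y hy)
        omega
      · intro y hy hr
        rw [pvRank_sc t? safe (hT _ hsc)] at hr
        exact pvRank_eq_one_imp t? safe y hr
    · by_cases hih : pvIh safe ∈ paths
      · have hfind : [pvSc safe, pvIh safe].find? (fun p => decide (p ∈ paths)) = some (pvIh safe) := by
          simp [List.find?, hsc, hih]
        rw [hfind]
        refine (pvMinUnique _ paths (pvIh safe) hih ?_ ?_).symm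
        · intro y hy
          rw [pvRank_ih t? safe (hT _ hih)]
          have h0 : pvRank t? (some safe) y ≠ 0 := pvRank_ne_zero _ _ _ (hT y hy)
          have h1 : pvRank t? (some safe) y ≠ 1 := fun hr =>
            hsc (pvRank_eq_one_imp t? safe y hr ▸ hy)
          omega
        · intro y hy hr
          rw [pvRank_ih t? safe (hT _ hih)] at hr
          exact pvRank_eq_two_imp t? safe y hr
      · have hfind : [pvSc safe, pvIh safe].find? (fun p => decide (p ∈ paths)) = none := by
          simp [List.find?, hsc, hih]
        rw [hfind]
        have hrank_ge3 : ∀ y ∈ paths, 3 ≤ pvRank t? (some safe) y := by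
          intro y hy
          have h0 : pvRank t? (some safe) y ≠ 0 := pvRank_ne_zero _ _ _ (hT y hy)
          have h1 : pvRank t? (some safe) y ≠ 1 := fun hr =>
            hsc (pvRank_eq_one_imp t? safe y hr ▸ hy)
          have h2 : pvRank t? (some safe) y ≠ 2 := fun hr =>
            hih (pvRank_eq_two_imp t? safe y hr ▸ hy)
          omega
        cases hf3 : paths.find? (fun p => pvPat3 safe p) with
        | some p3 =>
            obtain ⟨hp3, l1, l2, hsplit, hl1⟩ := List.find?_eq_some_iff_append.mp hf3
            have hp3mem : p3 ∈ paths := by rw [hsplit]; simp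
            have hr3 : pvRank t? (some safe) p3 = 3 :=
              pvRank_pat3 t? safe p3 (hT _ hp3mem)
                (fun h => hsc (h ▸ hp3mem)) (fun h => hih (h ▸ hp3mem)) hp3
            rw [hsplit]
            refine (pvMinAppend _ l1 l2 p3 ?_ ?_).symm
            · intro y hy
              have hymem : y ∈ paths := by rw [hsplit]; simp [hy]
              have hny3 : pvRank t? (some safe) y ≠ 3 := fun hr => by
                have h3 := pvRank_eq_three_imp t? safe y hr
                have := hl1 y hy
                simp [h3] at this
              have := hrank_ge3 y hymem
              omega
            · intro y hy
              have hymem : y ∈ paths := by rw [hsplit]; simp [hy]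
              rw [hr3]; exact hrank_ge3 y hymem
        | none =>
            have hall3 := List.find?_eq_none.mp hf3
            rw [← pvTailCore paths hne _ ?_]
            intro p hp
            exact pvRank_tail_some t? safe p (hT p hp)
              (fun h => hsc (h ▸ hp)) (fun h => hih (h ▸ hp))
              (by simpa using hall3 p hp)

-- the core equivalence on the shared `paths` list: the `existing` hit or A's tail vs B's keyed min
lemma pvCore_some (paths : List (List Char)) (hne : paths ≠ []) (t : List Char) (cls : List Char) :
    (if t ∈ paths then some t else pvARest paths cls)
    = PySem.List.min? paths (pvRank (some t) (if cls ≠ [] then some (pvSafeCF cls) else none)) := by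
  by_cases hmem : t ∈ paths
  · rw [if_pos hmem]
    refine (pvMinUnique _ paths t hmem ?_ ?_).symm
    · intro y hy
      rw [pvRank_target _ _ t rfl]
      exact Nat.zero_le _
    · intro y hy hr
      rw [pvRank_target _ _ t rfl] at hr
      exact (Option.some.inj (pvRank_eq_zero_imp _ _ _ hr)).symm
  · rw [if_neg hmem]
    exact pvCoreRest paths hne (some t) cls
      (fun p hp h => hmem (Option.some.inj h ▸ hp))

-- ===== VERDICT (by name: the statement is the Claim_ definition above) =====
theorem choose_dirty_snapshot_source_py_spec : Claim_equal_choose_dirty_snapshot_source_py := by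
  intro func dirty_paths _
  unfold Spec_choose_dirty_snapshot_source_py
  unfold choose_dirty_snapshot_source_py choose_dirty_snapshot_source_py_alt
  dsimp only
  by_cases hp : pvPaths dirty_paths = []
  · rw [if_pos hp, if_pos hp]
  · rw [if_neg hp, if_neg hp]
    cases he : pvExisting func with
    | none =>
        show Option.map String.ofList (pvARest (pvPaths dirty_paths) (pvCls func)) = _
        exact congrArg (Option.map String.ofList)
          (pvCoreRest _ hp none (pvCls func) (by simp))
    | some e =>
        show (if e ≠ "" ∧ pvLstripDS e.toList ∈ pvPaths dirty_paths
              then some (String.ofList (pvLstripDS e.toList))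
              else Option.map String.ofList (pvARest (pvPaths dirty_paths) (pvCls func)))
           = Option.map String.ofList
              (PySem.List.min? (pvPaths dirty_paths)
                (pvRank (if e ≠ "" then some (pvLstripDS e.toList) else none)
                  (if pvCls func ≠ [] then some (pvSafeCF (pvCls func)) else none)))
        by_cases hee : e = ""
        · rw [if_neg (fun h => h.1 hee), if_neg (not_not_intro hee)]
          exact congrArg (Option.map String.ofList)
            (pvCoreRest _ hp none (pvCls func) (by simp))
        · rw [if_pos (show ¬ e = "" from hee)]
          have hcore := pvCore_some (pvPaths dirty_paths) hp (pvLstripDS e.toList) (pvCls func)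
          by_cases hmem : pvLstripDS e.toList ∈ pvPaths dirty_paths
          · rw [if_pos ⟨hee, hmem⟩]
            rw [if_pos hmem] at hcore
            rw [← hcore]
            rfl
          · rw [if_neg (fun h => hmem h.2)]
            rw [if_neg hmem] at hcore
            exact congrArg (Option.map String.ofList) hcore
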